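-- pv_equiv track=rewrite | github.com/klrs/riichi-app | api/src/tile_utils.py | yolo_classes_to_one_line_string
-- ===== SOURCE A (Python) =====
-- def yolo_classes_to_one_line_string(yolo_classes: list[str]) -> str:
--     """
--     Convert a list of YOLO classes to mahjong one-line string format.
--
--     Example: ['1m', '2m', '3m', '1p', '2p'] -> '123m12p'
--     """
--     man = []
--     pin = []
--     sou = []
--     honors = []
--
--     for cls in yolo_classes:
--         if len(cls) >= 2:
--             number = cls[:-1]
--             suit = cls[-1]
--             if suit == "m":
--                 man.append(number)
--             elif suit == "p":
--                 pin.append(number)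
--             elif suit == "s":
--                 sou.append(number)
--             elif suit == "z":
--                 honors.append(number)
--
--     result = ""
--     if man:
--         result += "".join(sorted(man)) + "m"
--     if pin:
--         result += "".join(sorted(pin)) + "p"
--     if sou:
--         result += "".join(sorted(sou)) + "s"
--     if honors:
--         result += "".join(sorted(honors)) + "z"
--
--     return result
-- ===== SOURCE B (Python) =====
-- def yolo_classes_to_one_line_string(yolo_classes: list[str]) -> str:
--     """
--     Convert a list of YOLO classes to mahjong one-line string format.
--
--     Example: ['1m', '2m', '3m', '1p', '2p'] -> '123m12p'
--     """
--     parts = []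
--     for suit in "mpsz":
--         nums = sorted(c[:-1] for c in yolo_classes if len(c) >= 2 and c[-1] == suit)
--         if nums:
--             parts.append("".join(nums) + suit)
--     return "".join(parts)
-- ===== Notes on version B (the rewrite author's own statement) =====
-- stated objective: simpler
-- what changed: A makes one pass dispatching each class into four named accumulator lists via an if/elif chain and then assembles four conditional pieces; B instead loops over the four suit letters, for each suit filtering/sorting the matching number parts in one comprehension and joining the emitted pieces.
import Mathlib
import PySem

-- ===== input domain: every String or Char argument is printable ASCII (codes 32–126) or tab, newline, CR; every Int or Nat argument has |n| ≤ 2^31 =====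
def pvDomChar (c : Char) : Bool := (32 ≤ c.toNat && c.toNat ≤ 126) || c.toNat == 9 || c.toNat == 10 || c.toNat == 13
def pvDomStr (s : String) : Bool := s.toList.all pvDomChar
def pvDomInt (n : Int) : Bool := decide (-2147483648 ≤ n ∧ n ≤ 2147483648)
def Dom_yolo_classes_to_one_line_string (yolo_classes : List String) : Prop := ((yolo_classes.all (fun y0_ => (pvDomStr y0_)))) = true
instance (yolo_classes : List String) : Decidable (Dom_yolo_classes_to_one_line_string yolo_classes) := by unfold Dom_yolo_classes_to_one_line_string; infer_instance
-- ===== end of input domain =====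

-- B replaces A's one-pass dispatch into four named accumulator lists (if/elif chain) by a loop
-- over the four suit letters that filters, sorts and emits each suit's group directly (objective: simpler).

-- ===== PORT A =====
-- one fold over the classes carrying the four accumulator lists (man, pin, sou, honors)
def pvStepA (st : List String × List String × List String × List String) (cls : String) :
    List String × List String × List String × List String :=
  let man := st.1; let pin := st.2.1; let sou := st.2.2.1; let honors := st.2.2.2
  if 2 ≤ PySem.Str.len cls then
    let number := PySem.Str.slice cls none (some (-1))   -- cls[:-1]
    match PySem.Str.pyGet? cls (-1) with                 -- cls[-1]
    | some suit =>
      if suit == 'm' then (man ++ [number], pin, sou, honors)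
      else if suit == 'p' then (man, pin ++ [number], sou, honors)
      else if suit == 's' then (man, pin, sou ++ [number], honors)
      else if suit == 'z' then (man, pin, sou, honors ++ [number])
      else (man, pin, sou, honors)
    | none => (man, pin, sou, honors)
  else (man, pin, sou, honors)

def yolo_classes_to_one_line_string (yolo_classes : List String) : String :=
  let st := yolo_classes.foldl pvStepA ([], [], [], [])
  let result := ""
  let result := if st.1 ≠ [] then
    result ++ PySem.Str.join "" (PySem.List.sorted st.1 (fun x => x) false) ++ "m" else result
  let result := if st.2.1 ≠ [] then
    result ++ PySem.Str.join "" (PySem.List.sorted st.2.1 (fun x => x) false) ++ "p" else result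
  let result := if st.2.2.1 ≠ [] then
    result ++ PySem.Str.join "" (PySem.List.sorted st.2.2.1 (fun x => x) false) ++ "s" else result
  let result := if st.2.2.2 ≠ [] then
    result ++ PySem.Str.join "" (PySem.List.sorted st.2.2.2 (fun x => x) false) ++ "z" else result
  result

-- ===== PORT B =====
-- the generator 'c[:-1] for c in yolo_classes if len(c) >= 2 and c[-1] == suit'
def pvSel (yolo_classes : List String) (suit : Char) : List String :=
  (yolo_classes.filter
      (fun c => decide (2 ≤ PySem.Str.len c) && (PySem.Str.pyGet? c (-1) == some suit))).map
    (fun c => PySem.Str.slice c none (some (-1)))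

def yolo_classes_to_one_line_string_alt (yolo_classes : List String) : String :=
  let parts := (['m', 'p', 's', 'z']).foldl (fun parts suit =>   -- for suit in "mpsz":
    let nums := PySem.List.sorted (pvSel yolo_classes suit) (fun x => x) false
    if nums ≠ [] then parts ++ [PySem.Str.join "" nums ++ String.singleton suit] else parts) []
  PySem.Str.join "" parts

-- ===== PRECONDITION & SPEC =====
def Spec_yolo_classes_to_one_line_string (yolo_classes : List String) (out : String) : Prop := out = yolo_classes_to_one_line_string_alt yolo_classes
instance (yolo_classes : List String) (out : String) : Decidable (Spec_yolo_classes_to_one_line_string yolo_classes out) := by unfold Spec_yolo_classes_to_one_line_string; infer_instance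

-- ===== CLAIM (what is proved, stated in full; the proofs are below) =====
def Claim_equal_yolo_classes_to_one_line_string : Prop := ∀ (yolo_classes : List String), Dom_yolo_classes_to_one_line_string yolo_classes → Spec_yolo_classes_to_one_line_string yolo_classes (yolo_classes_to_one_line_string yolo_classes)

-- ===== LEMMAS AND PROOFS =====

theorem pvLoopA (xs : List String) (m p s z : List String) :
    xs.foldl pvStepA (m, p, s, z) =
      (m ++ pvSel xs 'm', p ++ pvSel xs 'p', s ++ pvSel xs 's', z ++ pvSel xs 'z') := by
  induction xs generalizing m p s z with
  | nil => simp [pvSel]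
  | cons c xs ih =>
    simp only [List.foldl_cons]
    by_cases h2 : 2 ≤ c.length
    · rcases hg : PySem.List.pyGet? c.toList (-1) with _ | suit
      · simp [pvStepA, h2, hg, ih, pvSel, List.filter_cons]
      · by_cases hm : suit = 'm'
        · subst hm; simp [pvStepA, h2, hg, ih, pvSel, List.filter_cons]
        · by_cases hp : suit = 'p'
          · subst hp; simp [pvStepA, h2, hg, ih, pvSel, List.filter_cons]
          · by_cases hs : suit = 's'
            · subst hs; simp [pvStepA, h2, hg, ih, pvSel, List.filter_cons]
            · by_cases hz : suit = 'z'
              · subst hz; simp [pvStepA, h2, hg, ih, pvSel, List.filter_cons]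
              · simp [pvStepA, h2, hg, ih, pvSel, List.filter_cons, hm, hp, hs, hz]
    · simp [pvStepA, h2, ih, pvSel, List.filter_cons]

-- ===== VERDICT (by name: the statement is the Claim_ definition above) =====
theorem yolo_classes_to_one_line_string_spec : Claim_equal_yolo_classes_to_one_line_string := by
  intro xs _
  show _ = _
  unfold yolo_classes_to_one_line_string yolo_classes_to_one_line_string_alt
  rw [pvLoopA]
  simp only [List.nil_append, List.foldl_cons, List.foldl_nil, ne_eq,
    PySem.List.sorted_eq_nil_iff]
  apply String.toList_inj.mp
  split_ifs <;>
    simp [PySem.Chars.join_cons_cons, PySem.Chars.join_singleton]
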